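-- pv_equiv track=rewrite | github.com/PolyArch/loom | tests/unit/dataflow-invariant/check.py | read_bits
-- ===== SOURCE A (Python) =====
-- def read_bits(words: list[int], offset: int, width: int) -> int:
--     value = 0
--     for bit in range(width):
--         word_index = (offset + bit) // 32
--         bit_index = (offset + bit) % 32
--         if word_index < len(words) and ((words[word_index] >> bit_index) & 1):
--             value |= 1 << bit
--     return value
-- ===== SOURCE B (Python) =====
-- def read_bits(words: list[int], offset: int, width: int) -> int:
--     if width <= 0:
--         return 0
--     big = 0
--     for i, w in enumerate(words):
--         big |= (w & 0xFFFFFFFF) << (32 * i)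
--     return (big >> offset) & ((1 << width) - 1)
-- ===== Notes on version B (the rewrite author's own statement) =====
-- stated objective: alternative
-- what changed: A scans bit by bit, recomputing a word index and bit index and testing one bit per iteration; B packs the words once into a single big integer (one OR/shift per word) and extracts the field in closed form with one shift and one mask.
-- outside the precondition, e.g. on read_bits([5], -1, 1): A returns 0, B raises ValueError; on read_bits([2147483648], -1, 1): A returns 1, B raises ValueError
import Mathlib
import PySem

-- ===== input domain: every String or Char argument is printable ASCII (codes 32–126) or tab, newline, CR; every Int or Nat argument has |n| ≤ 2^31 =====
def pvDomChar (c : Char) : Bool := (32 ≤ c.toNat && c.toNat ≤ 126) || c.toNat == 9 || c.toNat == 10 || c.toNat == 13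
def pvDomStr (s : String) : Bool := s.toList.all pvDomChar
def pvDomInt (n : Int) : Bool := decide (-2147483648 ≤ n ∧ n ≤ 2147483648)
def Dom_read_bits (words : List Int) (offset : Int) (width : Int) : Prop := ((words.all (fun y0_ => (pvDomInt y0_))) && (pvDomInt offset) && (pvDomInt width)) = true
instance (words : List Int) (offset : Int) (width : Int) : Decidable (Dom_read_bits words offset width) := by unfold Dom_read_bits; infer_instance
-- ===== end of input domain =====

-- B replaces A's per-bit scan (index/shift recomputed for every bit) by one pass packing the
-- words into a single big integer followed by a closed-form shift-and-mask extraction.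

-- ===== PORT A =====
-- Literal transliteration of A. `words[word_index]` is ported with pyGetD: exact wherever Python
-- returns (including negative-index wraparound); where Python raises IndexError
-- (word_index < -len(words), outside Pre_) pyGetD yields the default 0 instead.
def read_bits (words : List Int) (offset : Int) (width : Int) : Int :=
  (PySem.List.pyRange 0 width 1).foldl (fun value bit =>
    let word_index := PySem.Int.floordiv (offset + bit) 32
    let bit_index := PySem.Int.mod (offset + bit) 32
    if word_index < (words.length : Int) ∧
        PySem.Int.band (PySem.List.pyGetD words word_index 0 >>> bit_index.toNat) 1 ≠ 0 then
      PySem.Int.bor value ((1 : Int) <<< bit.toNat)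
    else value) 0

-- ===== PORT B =====
-- Literal transliteration of Source B. Shift counts are ported via .toNat: exact since width > 0 and,
-- inside Pre_, offset ≥ 0 (Python raises ValueError on a negative shift, outside Pre_).
def read_bits_alt (words : List Int) (offset : Int) (width : Int) : Int :=
  if width ≤ 0 then 0
  else
    let big := (PySem.List.enumerate words).foldl (fun big iw =>
      PySem.Int.bor big (PySem.Int.band iw.2 0xFFFFFFFF <<< (32 * iw.1).toNat)) 0
    PySem.Int.band (big >>> offset.toNat) ((1 <<< width.toNat) - 1)

-- ===== PRECONDITION & SPEC =====
-- Pre_ excludes negative offsets with positive width: there A either raises IndexError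
-- (offset // 32 < -len(words)) or returns a value produced by Python's accidental
-- negative-index wraparound, while B's own algorithm raises ValueError (negative shift).
def Pre_read_bits (words : List Int) (offset : Int) (width : Int) : Prop :=
  width ≤ 0 ∨ 0 ≤ offset
instance (words : List Int) (offset : Int) (width : Int) : Decidable (Pre_read_bits words offset width) := by unfold Pre_read_bits; infer_instance
def pvWitness_read_bits : List Int × Int × Int := ([5, 3], 33, 2)
def Spec_read_bits (words : List Int) (offset : Int) (width : Int) (out : Int) : Prop := out = read_bits_alt words offset width
instance (words : List Int) (offset : Int) (width : Int) (out : Int) : Decidable (Spec_read_bits words offset width out) := by unfold Spec_read_bits; infer_instance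

-- ===== CLAIM (what is proved, stated in full; the proofs are below) =====
def Claim_equal_read_bits : Prop := ∀ (words : List Int) (offset : Int) (width : Int), Dom_read_bits words offset width → Pre_read_bits words offset width → Spec_read_bits words offset width (read_bits words offset width)

-- ===== LEMMAS AND PROOFS =====

-- Python's low-32-bit mask of a word, as a natural number.
def maskN (w : Int) : Nat := (w % 4294967296).toNat

theorem pv_mod_pos (a b : Int) (hb : 0 ≤ b) : PySem.Int.mod a b = a % b := by
  simp [PySem.Int.mod, Int.fmod_eq_emod, hb]

theorem pv_fdiv_pos (a b : Int) (hb : 0 ≤ b) : PySem.Int.floordiv a b = a / b := by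
  simp [PySem.Int.floordiv, Int.fdiv_eq_ediv, hb]

theorem maskN_lt (w : Int) : maskN w < 2 ^ 32 := by
  unfold maskN; omega

-- PySem.Int.band w 0xFFFFFFFF is the (nonnegative) low-32-bit mask.
theorem band_mask (w : Int) : PySem.Int.band w 0xFFFFFFFF = (maskN w : Int) := by
  cases w with
  | ofNat n =>
    have h1 : (0xFFFFFFFF : Int) = ((4294967295 : Nat) : Int) := by norm_num
    rw [h1, Int.ofNat_eq_natCast, PySem.Int.band_natCast]
    have h2 : n &&& 4294967295 = n % 4294967296 := by
      have := Nat.and_two_pow_sub_one_eq_mod n 32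
      norm_num at this; exact this
    unfold maskN; rw [h2]
    have : ((n : Int) % 4294967296).toNat = n % 4294967296 := by omega
    rw [this]
  | negSucc n =>
    have hneg : Int.negSucc n = -(n : Int) - 1 := by
      rw [Int.negSucc_eq]; ring
    have hband : PySem.Int.band (Int.negSucc n) 0xFFFFFFFF
        = ((4294967295 - (4294967295 &&& n) : Nat) : Int) := by
      rw [PySem.Int.band]
      have h0 : ¬ (0 ≤ Int.negSucc n) := by rw [hneg]; omega
      rw [if_neg h0, if_pos (by norm_num)]
      norm_num [hneg]
      rfl
    rw [hband]
    have h2 : 4294967295 &&& n = n % 4294967296 := by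
      have h3 : 4294967295 &&& n = n &&& 4294967295 := Nat.land_comm _ n
      have := Nat.and_two_pow_sub_one_eq_mod n 32
      norm_num at this; rw [h3, this]
    rw [h2]
    unfold maskN
    have h4 : (Int.negSucc n % 4294967296).toNat = 4294967295 - n % 4294967296 := by
      rw [hneg]
      have : ((n : Int)) % 4294967296 = ((n % 4294967296 : Nat) : Int) := by
        rw [Int.natCast_emod]; norm_num
      omega
    rw [h4]

-- the per-bit test A performs, reduced to a Nat.testBit of the masked word
theorem cond_iff (w : Int) (b : Nat) (hb : b < 32) :
    (PySem.Int.band (w >>> b) 1 ≠ 0) ↔ (maskN w).testBit b = true := by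
  rw [PySem.Int.band_one, pv_mod_pos _ 2 (by norm_num), Int.shiftRight_eq_div_pow]
  rw [Nat.testBit_eq_decide_div_mod_eq]
  have hr0 : 0 ≤ w % 4294967296 := by omega
  -- pass to Int arithmetic
  have hcast : ((maskN w / 2 ^ b % 2 : Nat) : Int) = (w % 4294967296) / 2 ^ b % 2 := by
    unfold maskN
    rw [Int.natCast_emod, Int.natCast_ediv]
    push_cast
    rw [Int.toNat_of_nonneg hr0]
  have hsplit : w / (2 ^ b : Nat) % 2 = (w % 4294967296) / 2 ^ b % 2 := by
    have hdecomp : w = w % 4294967296 + (w / 4294967296) * 2 ^ (31 - b) * 2 * ((2:Int) ^ b) := by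
      have hpow : ((2:Int) ^ b) * (2 ^ (31 - b) * 2) = 4294967296 := by
        have : (2:Int) ^ b * (2 ^ (31 - b) * 2) = 2 ^ (b + (31 - b) + 1) := by ring
        rw [this]
        have : b + (31 - b) + 1 = 32 := by omega
        rw [this]; norm_num
      have hm := Int.ediv_add_emod w 4294967296
      have h5 : (w / 4294967296) * 2 ^ (31 - b) * 2 * ((2:Int) ^ b)
          = 4294967296 * (w / 4294967296) := by
        calc (w / 4294967296) * 2 ^ (31 - b) * 2 * ((2:Int) ^ b)
            = (w / 4294967296) * ((2:Int) ^ b * (2 ^ (31 - b) * 2)) := by ring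
          _ = 4294967296 * (w / 4294967296) := by rw [hpow]; ring
      linarith
    have hb2 : ((2:Int) ^ b) ≠ 0 := by positivity
    calc w / (2 ^ b : Nat) % 2
        = (w % 4294967296 + (w / 4294967296 * 2 ^ (31 - b) * 2) * (2:Int) ^ b) / (2 ^ b) % 2 := by
          push_cast
          rw [← hdecomp]
      _ = (w % 4294967296 / 2 ^ b + w / 4294967296 * 2 ^ (31 - b) * 2) % 2 := by
          rw [Int.add_mul_ediv_right _ _ hb2]
      _ = (w % 4294967296 / 2 ^ b + 2 * (w / 4294967296 * 2 ^ (31 - b))) % 2 := by ring_nf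
      _ = (w % 4294967296) / 2 ^ b % 2 := by
          rw [Int.add_mul_emod_self_left]
  constructor
  · intro h
    have hrange : 0 ≤ w / (2 ^ b : Nat) % 2 ∧ w / (2 ^ b : Nat) % 2 < 2 := by
      constructor
      · exact Int.emod_nonneg _ (by norm_num)
      · exact Int.emod_lt_of_pos _ (by norm_num)
    have h1 : w / (2 ^ b : Nat) % 2 = 1 := by omega
    rw [hsplit] at h1
    simp only [decide_eq_true_eq]
    omega
  · intro h
    simp only [decide_eq_true_eq] at h
    have : ((maskN w / 2 ^ b % 2 : Nat) : Int) = 1 := by rw [h]; norm_num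
    rw [hcast] at this
    rw [hsplit]
    omega

-- the Nat-level condition under which A sets bit x (offset = F ≥ 0)
def condN (words : List Int) (F : Nat) (x : Nat) : Bool :=
  decide ((F + x) / 32 < words.length) &&
    (maskN (words.getD ((F + x) / 32) 0)).testBit ((F + x) % 32)

-- the bit x of the packed big integer built from words, starting at word index i
def bigTest (ws : List Int) (i : Nat) (x : Nat) : Bool :=
  decide (32 * i ≤ x) && decide (x < 32 * (i + ws.length)) &&
    (maskN (ws.getD (x / 32 - i) 0)).testBit (x % 32)

-- ---- A-side loop characterisation ----
theorem A_loop (words : List Int) (F : Nat) : ∀ (W : Nat),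
    ∃ v : Nat,
      (PySem.List.pyRange 0 (W : Int) 1).foldl (fun value bit =>
        let word_index := PySem.Int.floordiv ((F : Int) + bit) 32
        let bit_index := PySem.Int.mod ((F : Int) + bit) 32
        if word_index < (words.length : Int) ∧
            PySem.Int.band (PySem.List.pyGetD words word_index 0 >>> bit_index.toNat) 1 ≠ 0 then
          PySem.Int.bor value ((1 : Int) <<< bit.toNat)
        else value) 0 = (v : Int) ∧
      ∀ x, v.testBit x = (decide (x < W) && condN words F x) := by
  intro W
  induction W with
  | zero =>
    refine ⟨0, ?_, ?_⟩
    · rw [PySem.List.pyRange_one_eq_nil (by norm_num)]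
      rfl
    · intro x; simp [Nat.zero_testBit]
  | succ W ih =>
    obtain ⟨v, hv, hbit⟩ := ih
    have hsplit : PySem.List.pyRange 0 ((W + 1 : Nat) : Int) 1
        = PySem.List.pyRange 0 (W : Int) 1 ++ [(W : Int)] := by
      push_cast
      exact PySem.List.pyRange_one_succ_right (by positivity)
    rw [hsplit, List.foldl_append, hv, List.foldl_cons, List.foldl_nil]
    -- evaluate the step at bit = W
    have hfd : PySem.Int.floordiv ((F : Int) + (W : Int)) 32 = (((F + W) / 32 : Nat) : Int) := by
      rw [pv_fdiv_pos _ _ (by norm_num)]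
      rw [show ((F : Int) + (W : Int)) = (((F + W : Nat)) : Int) by push_cast; ring,
        show (32 : Int) = ((32 : Nat) : Int) by norm_num, ← Int.natCast_ediv]
    have hmd : PySem.Int.mod ((F : Int) + (W : Int)) 32 = (((F + W) % 32 : Nat) : Int) := by
      rw [pv_mod_pos _ _ (by norm_num)]
      rw [show ((F : Int) + (W : Int)) = (((F + W : Nat)) : Int) by push_cast; ring,
        show (32 : Int) = ((32 : Nat) : Int) by norm_num, ← Int.natCast_emod]
    simp only [hfd, hmd]
    have hgd : PySem.List.pyGetD words (((F + W) / 32 : Nat) : Int) 0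
        = words.getD ((F + W) / 32) 0 := by
      rw [PySem.List.pyGetD_of_nonneg words 0 (by positivity)]
      have h9 : ((((F + W) / 32 : Nat) : Int)).toNat = (F + W) / 32 := by omega
      rw [h9]
    have htn : ((((F + W) % 32 : Nat)) : Int).toNat = (F + W) % 32 := by omega
    have htn2 : ((W : Int)).toNat = W := by omega
    simp only [hgd, htn, htn2]
    have hcondiff : ((((F + W) / 32 : Nat) : Int) < (words.length : Int) ∧
        PySem.Int.band (words.getD ((F + W) / 32) 0 >>> ((F + W) % 32)) 1 ≠ 0)
        ↔ condN words F W = true := by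
      unfold condN
      rw [Bool.and_eq_true, decide_eq_true_eq,
        ← cond_iff _ _ (Nat.mod_lt _ (by norm_num))]
      constructor
      · rintro ⟨ha, hb2⟩; exact ⟨by exact_mod_cast ha, hb2⟩
      · rintro ⟨ha, hb2⟩; exact ⟨by exact_mod_cast ha, hb2⟩
    by_cases hc : condN words F W = true
    · rw [if_pos (hcondiff.mpr hc)]
      have hsh : ((1 : Int) <<< W) = (((1 <<< W : Nat)) : Int) := rfl
      rw [hsh, PySem.Int.bor_natCast]
      refine ⟨v ||| 1 <<< W, rfl, ?_⟩
      intro x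
      rw [Nat.testBit_lor, hbit, Nat.one_shiftLeft, Nat.testBit_two_pow]
      by_cases hx : x = W
      · subst hx
        simp [hc]
      · have hd : (decide (W = x)) = false := by simp [Ne.symm hx]
        have hd2 : (decide (x < W)) = (decide (x < W + 1)) := by
          rcases Nat.lt_trichotomy x W with h | h | h
          · simp [h, Nat.lt_succ_of_lt h]
          · exact absurd h hx
          · simp [Nat.not_lt_of_gt h, by omega]
        rw [hd, hd2, Bool.or_false]
    · rw [if_neg (fun h => hc (hcondiff.mp h))]
      refine ⟨v, rfl, ?_⟩
      intro x
      rw [hbit]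
      by_cases hx : x = W
      · subst hx
        simp [Bool.not_eq_true] at hc
        simp [hc]
      · have hd2 : (decide (x < W)) = (decide (x < W + 1)) := by
          rcases Nat.lt_trichotomy x W with h | h | h
          · simp [h, Nat.lt_succ_of_lt h]
          · exact absurd h hx
          · simp [Nat.not_lt_of_gt h, by omega]
        rw [hd2]

-- ---- B-side big-integer characterisation ----
theorem B_big (ws : List Int) : ∀ (i acc : Nat),
    ∃ v : Nat,
      (PySem.List.enumerate ws (i : Int)).foldl (fun big iw =>
        PySem.Int.bor big (PySem.Int.band iw.2 0xFFFFFFFF <<< (32 * iw.1).toNat)) (acc : Int)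
        = (v : Int) ∧
      ∀ x, v.testBit x = (acc.testBit x || bigTest ws i x) := by
  induction ws with
  | nil =>
    intro i acc
    refine ⟨acc, by rw [PySem.List.enumerate_nil]; rfl, ?_⟩
    intro x
    have hfalse : bigTest [] i x = false := by
      unfold bigTest
      simp only [List.length_nil]
      by_cases h : 32 * i ≤ x
      · simp
      · simp [h]
    rw [hfalse, Bool.or_false]
  | cons w t ih =>
    intro i acc
    rw [PySem.List.enumerate_cons, List.foldl_cons]
    dsimp only
    rw [Int.shiftLeft_natCast_right]
    have hstep : PySem.Int.bor (acc : Int)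
        (PySem.Int.band w 0xFFFFFFFF <<< (32 * (i : Int)).toNat)
        = ((acc ||| maskN w <<< (32 * i) : Nat) : Int) := by
      rw [band_mask]
      have ht : ((32 * (i : Int))).toNat = 32 * i := by omega
      rw [ht]
      rw [show ((maskN w : Int) <<< (32 * i)) = (((maskN w <<< (32 * i) : Nat)) : Int) from rfl]
      rw [PySem.Int.bor_natCast]
    have hi1 : ((i : Int) + 1) = ((i + 1 : Nat) : Int) := by push_cast; ring
    rw [hstep, hi1]
    obtain ⟨v, hv, hbit⟩ := ih (i + 1) (acc ||| maskN w <<< (32 * i))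
    refine ⟨v, hv, ?_⟩
    intro x
    rw [hbit x, Nat.testBit_lor, Bool.or_assoc]
    congr 1
    rw [Nat.testBit_shiftLeft]
    unfold bigTest
    simp only [List.length_cons]
    rcases Nat.lt_or_ge x (32 * i) with h1 | h1
    · have hA : ¬ (32 * i ≤ x) := by omega
      have hB : ¬ (32 * (i + 1) ≤ x) := by omega
      simp [hA, hB]
    · rcases Nat.lt_or_ge x (32 * (i + 1)) with h2 | h2
      · have hA : 32 * i ≤ x := by omega
        have hB : ¬ (32 * (i + 1) ≤ x) := by omega
        have hC : x < 32 * (i + (t.length + 1)) := by omega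
        have e2 : x - 32 * i = x % 32 := by omega
        have hidx : x / 32 - i = 0 := by omega
        rw [e2, hidx]
        simp [hA, hB, hC]
      · have hA : 32 * i ≤ x := by omega
        have hB : 32 * (i + 1) ≤ x := by omega
        have e1 : (maskN w).testBit (x - 32 * i) = false := by
          apply Nat.testBit_lt_two_pow
          calc maskN w < 2 ^ 32 := maskN_lt w
            _ ≤ 2 ^ (x - 32 * i) := Nat.pow_le_pow_right (by norm_num) (by omega)
        have hidx : x / 32 - i = (x / 32 - (i + 1)) + 1 := by omega
        rw [e1, hidx]
        simp [hA, hB,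
          show 32 * (i + 1 + t.length) = 32 * (i + (t.length + 1)) by omega]
        try rfl

-- ===== VERDICT (by name: the statement is the Claim_ definition above) =====
theorem read_bits_spec : Claim_equal_read_bits := by
  unfold Claim_equal_read_bits
  intro words offset width _hdom hpre
  unfold Spec_read_bits read_bits read_bits_alt
  by_cases hw : width ≤ 0
  · rw [if_pos hw, PySem.List.pyRange_one_eq_nil hw]
    rfl
  · rw [if_neg hw]
    have hoff : 0 ≤ offset := by
      rcases hpre with h | h
      · omega
      · exact h
    obtain ⟨F, rfl⟩ : ∃ F : Nat, offset = (F : Int) :=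
      ⟨offset.toNat, (Int.toNat_of_nonneg hoff).symm⟩
    obtain ⟨W, rfl⟩ : ∃ W : Nat, width = (W : Int) :=
      ⟨width.toNat, (Int.toNat_of_nonneg (by omega)).symm⟩
    obtain ⟨vA, hvA, hA⟩ := A_loop words F W
    obtain ⟨vB, hvB, hB⟩ := B_big words 0 0
    rw [hvA]
    rw [show ((0 : Nat) : Int) = (0 : Int) from rfl] at hvB
    have hFt : ((F : Int)).toNat = F := by omega
    have hWt : ((W : Int)).toNat = W := by omega
    simp only [hFt, hWt, hvB]
    have hge : 1 ≤ (1 : Nat) <<< W := by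
      rw [Nat.one_shiftLeft]
      exact Nat.one_le_two_pow
    have h1 : ((vB : Int) >>> F) = ((vB >>> F : Nat) : Int) := rfl
    have h2 : (((1 <<< W : Nat) : Int)) - (1 : Int) = (((1 <<< W) - 1 : Nat) : Int) := by
      omega
    rw [h1, h2, PySem.Int.band_natCast]
    rw [Nat.cast_inj]
    apply Nat.eq_of_testBit_eq
    intro x
    rw [Nat.testBit_land, Nat.testBit_shiftRight, hA x, hB (F + x),
      Nat.one_shiftLeft, Nat.testBit_two_pow_sub_one, Nat.zero_testBit, Bool.false_or]
    unfold bigTest condN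
    have b0 : (decide (32 * 0 ≤ F + x)) = true := by simp
    rw [b0, Bool.true_and]
    have b1 : (decide ((F + x) / 32 < words.length))
        = (decide (F + x < 32 * (0 + words.length))) := by
      simp only [decide_eq_decide]
      rw [Nat.div_lt_iff_lt_mul (by norm_num)]
      omega
    have hsub : (F + x) / 32 - 0 = (F + x) / 32 := by omega
    rw [b1, hsub]
    cases hm : (decide (F + x < 32 * (0 + words.length))) <;>
      cases hx : (decide (x < W)) <;>
        simp
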